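-- pv_equiv track=rewrite | github.com/Shriraj26/InterviewCamp | 10. Arrays and Strings 2/1. Max Diff/temp.py | nearestCity
-- ===== SOURCE A (Python) =====
-- import collections, bisect, math
--
-- def nearestCity(points, xCoordinates, yCoordinates, queriedPoints): # binary search O(N*logN) of number of points
--     XY, sameXY = {}, [collections.defaultdict(dict), collections.defaultdict(dict)]
--     for p, x, y in zip(points, xCoordinates, yCoordinates):
--         XY[p] = (x, y), (y, x)
--         for (x, y), same in zip(XY[p], sameXY):
--             same[x][y] = p
--     sortXY = [{x: sorted(y) for x, y in same.items()} for same in sameXY]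
--
--     Near = collections.namedtuple("Near", ["distance", "point"])
--     none, res = Near(math.inf, ""), []
--     for p in queriedPoints:
--         near = none
--         for (x, y), same, sort in zip(XY[p], sameXY, sortXY):
--             i = bisect.bisect_left(sort[x], y)
--             near = min(
--                 near,
--                 Near(y - sort[x][i - 1], same[x][sort[x][i - 1]]) if i else none,
--                 Near(sort[x][i + 1] - y, same[x][sort[x][i + 1]]) if i < len(sort[x]) - 1 else none,
--             )
--
--         toAppend = near.point
--         if toAppend == '':
--             toAppend = None
--         res.append(toAppend)
--     return res
-- ===== SOURCE B (Python) =====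
-- def nearestCity(points, xCoordinates, yCoordinates, queriedPoints):
--     # Brute-force scan over deduplicated locations instead of sorted columns + bisect.
--     coord = {}
--     byloc = {}
--     for p, x, y in zip(points, xCoordinates, yCoordinates):
--         coord[p] = (x, y)
--         byloc[(x, y)] = p
--     res = []
--     for q in queriedPoints:
--         qx, qy = coord[q]
--         best = None
--         for (x, y), name in byloc.items():
--             if (x == qx or y == qy) and (x, y) != (qx, qy):
--                 cand = (abs(x - qx) + abs(y - qy), name)
--                 if best is None or cand < best:
--                     best = cand
--         res.append(best[1] if best is not None else None)
--     return res
-- ===== Notes on version B (the rewrite author's own statement) =====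
-- stated objective: simpler
-- what changed: Replaces A's per-axis nested dicts, per-column sorted key lists and bisect_left neighbour search by one location dict (x,y)->name scanned in full per query, tracking the minimum (distance, name) tuple directly.
-- outside the precondition, e.g. on nearestCity(['', 'a'], [0, 0], [1, 2], ['a']): A returns [None], B returns ['']
import Mathlib
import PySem

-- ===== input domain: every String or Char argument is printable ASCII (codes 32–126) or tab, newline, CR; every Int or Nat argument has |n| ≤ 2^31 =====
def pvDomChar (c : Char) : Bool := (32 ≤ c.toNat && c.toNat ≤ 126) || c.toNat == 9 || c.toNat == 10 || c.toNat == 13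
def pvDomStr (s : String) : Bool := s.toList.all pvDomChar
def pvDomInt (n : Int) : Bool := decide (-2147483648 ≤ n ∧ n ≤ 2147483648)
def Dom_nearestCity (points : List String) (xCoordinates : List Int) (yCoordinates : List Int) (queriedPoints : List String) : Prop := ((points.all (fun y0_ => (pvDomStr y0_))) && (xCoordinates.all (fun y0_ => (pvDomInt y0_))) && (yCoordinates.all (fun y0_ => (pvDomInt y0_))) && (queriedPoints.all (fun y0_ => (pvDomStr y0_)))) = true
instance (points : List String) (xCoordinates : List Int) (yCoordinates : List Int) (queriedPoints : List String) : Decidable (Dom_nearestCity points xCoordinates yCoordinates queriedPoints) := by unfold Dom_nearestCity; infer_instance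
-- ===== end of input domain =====

-- B replaces A's per-coordinate sorted columns + bisect neighbour search with one brute-force
-- scan over the deduplicated location dict per query (simpler, not faster).

-- ===== PORT A =====
-- A's Near(math.inf, "") sentinel is represented as `none`; a finite Near(d, p) as `some (d, p)`.
-- Python's min on Near tuples is lexicographic on (distance, point):
def pvNMin (a b : Int × String) : Int × String :=
  if a.1 < b.1 then a else if b.1 < a.1 then b else if a.2 ≤ b.2 then a else b

def pvOMin : Option (Int × String) → Option (Int × String) → Option (Int × String)
  | none, b => b
  | some a, none => some a
  | some a, some b => some (pvNMin a b)

-- one iteration of A's `for (x, y), same, sort in zip(XY[p], sameXY, sortXY)` loop;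
-- bisect.bisect_left is PySem.List.bisectLeft
def pvView (near : Option (Int × String)) (x y : Int)
    (same : PySem.Dict Int (PySem.Dict Int String)) (sort : PySem.Dict Int (List Int)) :
    Option (Int × String) :=
  let l := sort.getD x []
  let i := PySem.List.bisectLeft l y
  let c1 := if i ≠ 0 then
      some (y - l.getD (i - 1) 0, (same.getD x PySem.Dict.empty).getD (l.getD (i - 1) 0) "")
    else none
  let c2 := if (i : Int) < (l.length : Int) - 1 then
      some (l.getD (i + 1) 0 - y, (same.getD x PySem.Dict.empty).getD (l.getD (i + 1) 0) "")
    else none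
  pvOMin (pvOMin near c1) c2

def nearestCity (points : List String) (xCoordinates : List Int) (yCoordinates : List Int) (queriedPoints : List String) : List (Option String) :=
  let rows := points.zip (xCoordinates.zip yCoordinates)
  let st := rows.foldl (fun st r =>
      (st.1.insert r.1 ((r.2.1, r.2.2), (r.2.2, r.2.1)),
       (st.2.1.insert r.2.1 ((st.2.1.getD r.2.1 PySem.Dict.empty).insert r.2.2 r.1),
        st.2.2.insert r.2.2 ((st.2.2.getD r.2.2 PySem.Dict.empty).insert r.2.1 r.1))))
    ((PySem.Dict.empty : PySem.Dict String ((Int × Int) × (Int × Int))),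
     ((PySem.Dict.empty : PySem.Dict Int (PySem.Dict Int String)),
      (PySem.Dict.empty : PySem.Dict Int (PySem.Dict Int String))))
  let XY := st.1
  let same0 := st.2.1
  let same1 := st.2.2
  let sort0 := same0.items.foldl (fun d kv =>
      d.insert kv.1 (PySem.List.sorted (kv.2.items.map (fun p => p.1)) (fun v => v) false))
    (PySem.Dict.empty : PySem.Dict Int (List Int))
  let sort1 := same1.items.foldl (fun d kv =>
      d.insert kv.1 (PySem.List.sorted (kv.2.items.map (fun p => p.1)) (fun v => v) false))
    (PySem.Dict.empty : PySem.Dict Int (List Int))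
  queriedPoints.foldl (fun res p =>
    let xy := XY.getD p ((0, 0), (0, 0))
    let n1 := pvView none xy.1.1 xy.1.2 same0 sort0
    let n2 := pvView n1 xy.2.1 xy.2.2 same1 sort1
    res ++ [match n2 with
            | none => none
            | some dn => if dn.2 = "" then none else some dn.2]) []

-- ===== PORT B =====
def nearestCity_alt (points : List String) (xCoordinates : List Int) (yCoordinates : List Int) (queriedPoints : List String) : List (Option String) :=
  let cb := (points.zip (xCoordinates.zip yCoordinates)).foldl
    (fun (s : PySem.Dict String (Int × Int) × PySem.Dict (Int × Int) String) r =>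
      (s.1.insert r.1 (r.2.1, r.2.2), s.2.insert (r.2.1, r.2.2) r.1))
    (PySem.Dict.empty, PySem.Dict.empty)
  queriedPoints.map (fun q =>
    let qc := cb.1.getD q (0, 0)
    let best := cb.2.items.foldl (fun best kv =>
      if (kv.1.1 = qc.1 ∨ kv.1.2 = qc.2) ∧ kv.1 ≠ qc then
        let cand := (|kv.1.1 - qc.1| + |kv.1.2 - qc.2|, kv.2)
        match best with
        | none => some cand
        | some b => if cand.1 < b.1 ∨ (cand.1 = b.1 ∧ cand.2 < b.2) then some cand else some b
      else best) none
    best.map (fun dn => dn.2))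

-- ===== PRECONDITION & SPEC =====
-- Pre_ excludes queried names absent from the zipped point rows (A raises KeyError there), and
-- inputs where some point is named "" — A's Near(inf, "") "no city" sentinel collides with that
-- real name, so on such corners A's None and B's "" are both defensible answers.
def Pre_nearestCity (points : List String) (xCoordinates : List Int) (yCoordinates : List Int) (queriedPoints : List String) : Prop :=
  (∀ q ∈ queriedPoints, q ∈ points.take (min xCoordinates.length yCoordinates.length)) ∧
  "" ∉ points
instance (points : List String) (xCoordinates : List Int) (yCoordinates : List Int) (queriedPoints : List String) : Decidable (Pre_nearestCity points xCoordinates yCoordinates queriedPoints) := by unfold Pre_nearestCity; infer_instance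

def pvWitness_nearestCity : List String × List Int × List Int × List String :=
  (["a", "b"], [0, 0], [1, 2], ["a"])

def Spec_nearestCity (points : List String) (xCoordinates : List Int) (yCoordinates : List Int) (queriedPoints : List String) (out : List (Option String)) : Prop := out = nearestCity_alt points xCoordinates yCoordinates queriedPoints
instance (points : List String) (xCoordinates : List Int) (yCoordinates : List Int) (queriedPoints : List String) (out : List (Option String)) : Decidable (Spec_nearestCity points xCoordinates yCoordinates queriedPoints out) := by unfold Spec_nearestCity; infer_instance

-- ===== CLAIM (what is proved, stated in full; the proofs are below) =====
def Claim_equal_nearestCity : Prop := ∀ (points : List String) (xCoordinates : List Int) (yCoordinates : List Int) (queriedPoints : List String), Dom_nearestCity points xCoordinates yCoordinates queriedPoints → Pre_nearestCity points xCoordinates yCoordinates queriedPoints → Spec_nearestCity points xCoordinates yCoordinates queriedPoints (nearestCity points xCoordinates yCoordinates queriedPoints)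

-- ===== LEMMAS AND PROOFS =====

-- lexicographic order on (distance, name), the order Python's tuple min uses
def pvLexLe (a b : Int × String) : Prop := a.1 < b.1 ∨ (a.1 = b.1 ∧ a.2 ≤ b.2)

theorem pvLexLe_refl (a : Int × String) : pvLexLe a a := Or.inr ⟨rfl, le_refl _⟩

theorem pvLexLe_total (a b : Int × String) : pvLexLe a b ∨ pvLexLe b a := by
  rcases lt_trichotomy a.1 b.1 with h | h | h
  · exact Or.inl (Or.inl h)
  · rcases le_total a.2 b.2 with h2 | h2
    · exact Or.inl (Or.inr ⟨h, h2⟩)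
    · exact Or.inr (Or.inr ⟨h.symm, h2⟩)
  · exact Or.inr (Or.inl h)

theorem pvLexLe_antisymm {a b : Int × String} (h1 : pvLexLe a b) (h2 : pvLexLe b a) : a = b := by
  rcases h1 with h1 | ⟨he1, hl1⟩ <;> rcases h2 with h2 | ⟨he2, hl2⟩
  · omega
  · omega
  · omega
  · exact Prod.ext he1 (le_antisymm hl1 hl2)

theorem pvLexLe_trans {a b c : Int × String} (h1 : pvLexLe a b) (h2 : pvLexLe b c) : pvLexLe a c := by
  rcases h1 with h1 | ⟨he1, hl1⟩ <;> rcases h2 with h2 | ⟨he2, hl2⟩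
  · exact Or.inl (lt_trans h1 h2)
  · exact Or.inl (he2 ▸ h1)
  · exact Or.inl (he1 ▸ h2)
  · exact Or.inr ⟨he1.trans he2, le_trans hl1 hl2⟩

theorem pvNMin_cases (a b : Int × String) : pvNMin a b = a ∨ pvNMin a b = b := by
  unfold pvNMin; split_ifs <;> simp

theorem pvNMin_left {a b : Int × String} (h : pvLexLe a b) : pvNMin a b = a := by
  unfold pvNMin
  rcases h with h | ⟨he, hl⟩
  · rw [if_pos h]
  · rw [if_neg (by omega), if_neg (by omega), if_pos hl]

theorem pvNMin_right {a b : Int × String} (h : pvLexLe b a) : pvNMin a b = b := by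
  rcases pvLexLe_total a b with h' | h'
  · rw [pvNMin_left h', pvLexLe_antisymm h' h]
  · unfold pvNMin
    rcases h with h | ⟨he, hl⟩
    · rw [if_neg (by omega), if_pos h]
    · rw [if_neg (by omega), if_neg (by omega)]
      by_cases h2 : a.2 ≤ b.2
      · rw [if_pos h2]; exact Prod.ext he.symm (le_antisymm h2 hl)
      · rw [if_neg h2]

theorem pvNMin_lexLe_left (a b : Int × String) : pvLexLe (pvNMin a b) a := by
  rcases pvLexLe_total a b with h | h
  · rw [pvNMin_left h]; exact pvLexLe_refl a
  · rw [pvNMin_right h]; exact h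

theorem pvNMin_lexLe_right (a b : Int × String) : pvLexLe (pvNMin a b) b := by
  rcases pvLexLe_total a b with h | h
  · rw [pvNMin_left h]; exact h
  · rw [pvNMin_right h]; exact pvLexLe_refl b

theorem pvNMin_comm (a b : Int × String) : pvNMin a b = pvNMin b a := by
  rcases pvLexLe_total a b with h | h
  · by_cases h' : pvLexLe b a
    · rw [pvNMin_left h, pvNMin_left h']; exact pvLexLe_antisymm h h'
    · rw [pvNMin_left h, pvNMin_right h]
  · by_cases h' : pvLexLe a b
    · rw [pvNMin_left h', pvNMin_left h]; exact pvLexLe_antisymm h' h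
    · rw [pvNMin_right h, pvNMin_left h]

theorem pvNMin_assoc (a b c : Int × String) : pvNMin (pvNMin a b) c = pvNMin a (pvNMin b c) := by
  by_cases hab : pvLexLe a b <;> by_cases hbc : pvLexLe b c
  · rw [pvNMin_left hab, pvNMin_left hbc, pvNMin_left hab,
      pvNMin_left (pvLexLe_trans hab hbc)]
  · have hcb : pvLexLe c b := (pvLexLe_total b c).resolve_left hbc
    rw [pvNMin_left hab, pvNMin_right hcb]
  · have hba : pvLexLe b a := (pvLexLe_total a b).resolve_left hab
    rw [pvNMin_right hba, pvNMin_left hbc, pvNMin_right hba]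
  · have hba : pvLexLe b a := (pvLexLe_total a b).resolve_left hab
    have hcb : pvLexLe c b := (pvLexLe_total b c).resolve_left hbc
    rw [pvNMin_right hba, pvNMin_right hcb, pvNMin_right (pvLexLe_trans hcb hba)]

theorem pvOMin_none_right (a : Option (Int × String)) : pvOMin a none = a := by
  cases a <;> rfl

theorem pvOMin_none_left (a : Option (Int × String)) : pvOMin none a = a := rfl

theorem pvOMin_comm (a b : Option (Int × String)) : pvOMin a b = pvOMin b a := by
  cases a <;> cases b <;> simp [pvOMin, pvNMin_comm]

theorem pvOMin_assoc (a b c : Option (Int × String)) :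
    pvOMin (pvOMin a b) c = pvOMin a (pvOMin b c) := by
  cases a <;> cases b <;> cases c <;> simp [pvOMin, pvNMin_assoc]

-- min over a candidate list (value of Python's running min)
def pvMinList (l : List (Int × String)) : Option (Int × String) :=
  l.foldl (fun a c => pvOMin a (some c)) none

theorem pvMinList_foldl (l : List (Int × String)) (a : Option (Int × String)) :
    l.foldl (fun a c => pvOMin a (some c)) a = pvOMin a (pvMinList l) := by
  induction l generalizing a with
  | nil => simp [pvMinList, pvOMin_none_right]
  | cons c t ih =>
    show List.foldl _ (pvOMin a (some c)) t = _
    have h : pvMinList (c :: t) = pvOMin (some c) (pvMinList t) := by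
      show List.foldl _ (pvOMin none (some c)) t = _
      rw [pvOMin_none_left]; exact ih (some c)
    rw [ih (pvOMin a (some c)), h, pvOMin_assoc]

theorem pvMinList_cons (c : Int × String) (t : List (Int × String)) :
    pvMinList (c :: t) = pvOMin (some c) (pvMinList t) := by
  rw [pvMinList, List.foldl_cons, pvOMin_none_left, pvMinList_foldl]

theorem pvMinList_mem {l : List (Int × String)} {m : Int × String}
    (h : pvMinList l = some m) : m ∈ l := by
  induction l with
  | nil => simp [pvMinList] at h
  | cons c t ih =>
    rw [pvMinList_cons] at h
    cases ht : pvMinList t with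
    | none => rw [ht, pvOMin_none_right] at h; simp at h; simp [h]
    | some z =>
      rw [ht] at h
      simp only [pvOMin] at h
      rcases pvNMin_cases c z with he | he <;> rw [he] at h <;>
        simp at h
      · simp [h]
      · exact List.mem_cons_of_mem _ (ih (h ▸ ht))

theorem pvMinList_eq_of_min {l : List (Int × String)} {m : Int × String}
    (hm : m ∈ l) (hmin : ∀ z ∈ l, pvLexLe m z) : pvMinList l = some m := by
  induction l with
  | nil => simp at hm
  | cons c t ih =>
    rw [pvMinList_cons]
    by_cases hmt : m ∈ t
    · rw [ih hmt (fun z hz => hmin z (List.mem_cons_of_mem _ hz))]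
      simp only [pvOMin]
      rw [pvNMin_right (hmin c List.mem_cons_self)]
    · have hmc : m = c := by
        rcases List.mem_cons.mp hm with h | h
        · exact h
        · exact absurd h hmt
      subst hmc
      cases ht : pvMinList t with
      | none => rw [pvOMin_none_right]
      | some z =>
        have hz := pvMinList_mem ht
        simp only [pvOMin]
        rw [pvNMin_left (hmin z (List.mem_cons_of_mem _ hz))]

theorem pvMinList_split {β : Type} (f g h : β → Option (Int × String)) (l : List β)
    (hpt : ∀ kv ∈ l, (f kv = g kv ∧ h kv = none) ∨ (f kv = h kv ∧ g kv = none)) :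
    pvMinList (l.filterMap f) = pvOMin (pvMinList (l.filterMap g)) (pvMinList (l.filterMap h)) := by
  induction l with
  | nil => simp [pvMinList, pvOMin]
  | cons b t ih =>
    have iht := ih (fun kv hkv => hpt kv (List.mem_cons_of_mem _ hkv))
    rcases hpt b List.mem_cons_self with ⟨hfb, hhb⟩ | ⟨hfb, hgb⟩
    · cases hb : f b with
      | none =>
        rw [List.filterMap_cons_none (hfb ▸ hb), List.filterMap_cons_none hhb,
          List.filterMap_cons_none (hfb ▸ hb : g b = none), iht]
      | some c =>
        rw [List.filterMap_cons_some hb, List.filterMap_cons_none hhb,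
          List.filterMap_cons_some (hfb ▸ hb : g b = some c),
          pvMinList_cons, pvMinList_cons, iht, ← pvOMin_assoc]
    · cases hb : f b with
      | none =>
        rw [List.filterMap_cons_none (hfb ▸ hb), List.filterMap_cons_none hgb,
          List.filterMap_cons_none (hfb ▸ hb : h b = none), iht]
      | some c =>
        rw [List.filterMap_cons_some hb, List.filterMap_cons_none hgb,
          List.filterMap_cons_some (hfb ▸ hb : h b = some c),
          pvMinList_cons, pvMinList_cons, iht, ← pvOMin_assoc,
          pvOMin_comm (some c) (pvMinList (t.filterMap g)), pvOMin_assoc]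


-- ---- B's per-query fold as a pvMinList over the filtered candidates ----

def pvCandF (qc : Int × Int) (kv : (Int × Int) × String) : Option (Int × String) :=
  if (kv.1.1 = qc.1 ∨ kv.1.2 = qc.2) ∧ kv.1 ≠ qc then
    some (|kv.1.1 - qc.1| + |kv.1.2 - qc.2|, kv.2)
  else none

theorem pvNMin_ite (b c : Int × String) :
    (if c.1 < b.1 ∨ (c.1 = b.1 ∧ c.2 < b.2) then some c else some b) = some (pvNMin b c) := by
  by_cases h : c.1 < b.1 ∨ (c.1 = b.1 ∧ c.2 < b.2)
  · rw [if_pos h, pvNMin_right]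
    rcases h with h | ⟨h1, h2⟩
    · exact Or.inl h
    · exact Or.inr ⟨h1, le_of_lt h2⟩
  · rw [if_neg h, pvNMin_left]
    rcases lt_trichotomy b.1 c.1 with h1 | h1 | h1
    · exact Or.inl h1
    · exact Or.inr ⟨h1, not_lt.mp (fun hc => h (Or.inr ⟨h1.symm, hc⟩))⟩
    · exact absurd (Or.inl h1) h

theorem pvBfold_eq (qc : Int × Int) (items : List ((Int × Int) × String)) :
    ∀ a : Option (Int × String),
    items.foldl (fun best kv =>
      if (kv.1.1 = qc.1 ∨ kv.1.2 = qc.2) ∧ kv.1 ≠ qc then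
        let cand := (|kv.1.1 - qc.1| + |kv.1.2 - qc.2|, kv.2)
        match best with
        | none => some cand
        | some b => if cand.1 < b.1 ∨ (cand.1 = b.1 ∧ cand.2 < b.2) then some cand else some b
      else best) a
    = pvOMin a (pvMinList (items.filterMap (pvCandF qc))) := by
  induction items with
  | nil => intro a; simp [pvMinList, pvOMin_none_right]
  | cons kv t ih =>
    intro a
    rw [List.foldl_cons]
    by_cases hg : (kv.1.1 = qc.1 ∨ kv.1.2 = qc.2) ∧ kv.1 ≠ qc
    · have hstep : (if (kv.1.1 = qc.1 ∨ kv.1.2 = qc.2) ∧ kv.1 ≠ qc then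
          let cand := (|kv.1.1 - qc.1| + |kv.1.2 - qc.2|, kv.2)
          match a with
          | none => some cand
          | some b => if cand.1 < b.1 ∨ (cand.1 = b.1 ∧ cand.2 < b.2) then some cand else some b
        else a) = pvOMin a (some (|kv.1.1 - qc.1| + |kv.1.2 - qc.2|, kv.2)) := by
        rw [if_pos hg]
        cases a with
        | none => rfl
        | some b => exact pvNMin_ite b _
      rw [hstep, ih, List.filterMap_cons_some (by rw [pvCandF, if_pos hg]),
        pvMinList_cons, ← pvOMin_assoc]
    · have hstep : (if (kv.1.1 = qc.1 ∨ kv.1.2 = qc.2) ∧ kv.1 ≠ qc then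
          let cand := (|kv.1.1 - qc.1| + |kv.1.2 - qc.2|, kv.2)
          match a with
          | none => some cand
          | some b => if cand.1 < b.1 ∨ (cand.1 = b.1 ∧ cand.2 < b.2) then some cand else some b
        else a) = a := by rw [if_neg hg]
      rw [hstep, ih, List.filterMap_cons_none (by rw [pvCandF, if_neg hg])]

-- ---- the build invariant: A's nested per-coordinate dicts project B's location dict ----

-- pvProjX x extracts the (y, name) column of vertical line x; pvProjY y the (x, name) row of y
def pvProjX (x : Int) (kv : (Int × Int) × String) : Option (Int × String) :=
  if kv.1.1 = x then some (kv.1.2, kv.2) else none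

def pvProjY (y : Int) (kv : (Int × Int) × String) : Option (Int × String) :=
  if kv.1.2 = y then some (kv.1.1, kv.2) else none

theorem pvMem_keys_iff {κ ν : Type} [BEq κ] (d : PySem.Dict κ ν) (k : κ) :
    k ∈ d.keys ↔ ∃ v, (k, v) ∈ d.items := by
  simp only [PySem.Dict.keys, List.mem_map]
  constructor
  · rintro ⟨kv, hkv, rfl⟩; exact ⟨kv.2, hkv⟩
  · rintro ⟨v, hv⟩; exact ⟨(k, v), hv, rfl⟩

theorem pvInv_stepX (p : String) (a b : Int)
    (S : PySem.Dict Int (PySem.Dict Int String)) (Bd : PySem.Dict (Int × Int) String)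
    (hinv : ∀ x, (S.getD x PySem.Dict.empty).items = Bd.items.filterMap (pvProjX x)) :
    ∀ x, ((S.insert a ((S.getD a PySem.Dict.empty).insert b p)).getD x PySem.Dict.empty).items
      = (Bd.insert (a, b) p).items.filterMap (pvProjX x) := by
  intro x
  by_cases hx : x = a
  · subst hx
    rw [PySem.Dict.getD_insert_self]
    have hinner := hinv x
    have hmemiff : b ∈ (S.getD x PySem.Dict.empty).keys ↔ (x, b) ∈ Bd.keys := by
      rw [pvMem_keys_iff, pvMem_keys_iff]
      constructor
      · rintro ⟨v, hv⟩
        rw [hinner] at hv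
        rcases List.mem_filterMap.mp hv with ⟨kv, hkv, hpr⟩
        rw [pvProjX] at hpr
        split_ifs at hpr with ht
        · have h1 : kv.1.2 = b := congrArg Prod.fst (Option.some.inj hpr)
          refine ⟨kv.2, ?_⟩
          have hkv' : kv = ((x, b), kv.2) := Prod.ext (Prod.ext ht h1) rfl
          rw [← hkv']; exact hkv
      · rintro ⟨v, hv⟩
        exact ⟨v, by rw [hinner]; exact List.mem_filterMap.mpr ⟨((x, b), v), hv, by simp [pvProjX]⟩⟩
    have hcontains : (S.getD x PySem.Dict.empty).contains b = Bd.contains (x, b) := by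
      cases hb : Bd.contains (x, b) with
      | true =>
        exact (PySem.Dict.contains_iff_mem_keys _ _).mpr
          (hmemiff.mpr ((PySem.Dict.contains_iff_mem_keys _ _).mp hb))
      | false =>
        cases hib : (S.getD x PySem.Dict.empty).contains b with
        | false => rfl
        | true =>
          have hmem := hmemiff.mp ((PySem.Dict.contains_iff_mem_keys _ _).mp hib)
          exact absurd ((PySem.Dict.contains_iff_mem_keys _ _).mpr hmem) (by simp [hb])
    by_cases hc : Bd.contains (x, b) = true
    · rw [PySem.Dict.items_insert_of_contains _ _ (hcontains.trans hc),
        PySem.Dict.items_insert_of_contains _ _ hc, hinner, List.map_filterMap, List.filterMap_map]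
      refine List.filterMap_congr ?_
      intro kv _
      simp only [Function.comp]
      obtain ⟨⟨u, v⟩, n⟩ := kv
      by_cases hu : u = x
      · subst hu
        by_cases hv : v = b
        · subst hv; simp [pvProjX]
        · simp [pvProjX, hv]
      · simp [pvProjX, hu]
    · have hc' : Bd.contains (x, b) = false := by
        cases h : Bd.contains (x, b)
        · rfl
        · exact absurd h hc
      rw [PySem.Dict.items_insert_of_not_contains _ _ (hcontains.trans hc'),
        PySem.Dict.items_insert_of_not_contains _ _ hc', List.filterMap_append, hinner]
      simp [pvProjX]
  · rw [PySem.Dict.getD_insert_of_ne _ _ _ hx, hinv x]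
    cases hc : Bd.contains (a, b) with
    | true =>
      rw [PySem.Dict.items_insert_of_contains _ _ hc, List.filterMap_map]
      refine (List.filterMap_congr ?_).symm
      intro kv _
      simp only [Function.comp]
      obtain ⟨⟨u, v⟩, n⟩ := kv
      by_cases huv : (u, v) = (a, b)
      · have hua : u = a := congrArg Prod.fst huv
        have hax : ¬a = x := fun h => hx h.symm
        have hux : ¬u = x := hua ▸ hax
        simp [pvProjX, huv, hux, hax]
      · simp [pvProjX, huv]
    | false =>
      rw [PySem.Dict.items_insert_of_not_contains _ _ hc, List.filterMap_append]
      simp [pvProjX, (Ne.symm hx : a ≠ x)]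

theorem pvInv_stepY (p : String) (a b : Int)
    (S : PySem.Dict Int (PySem.Dict Int String)) (Bd : PySem.Dict (Int × Int) String)
    (hinv : ∀ y, (S.getD y PySem.Dict.empty).items = Bd.items.filterMap (pvProjY y)) :
    ∀ y, ((S.insert b ((S.getD b PySem.Dict.empty).insert a p)).getD y PySem.Dict.empty).items
      = (Bd.insert (a, b) p).items.filterMap (pvProjY y) := by
  intro y
  by_cases hy : y = b
  · subst hy
    rw [PySem.Dict.getD_insert_self]
    have hinner := hinv y
    have hmemiff : a ∈ (S.getD y PySem.Dict.empty).keys ↔ (a, y) ∈ Bd.keys := by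
      rw [pvMem_keys_iff, pvMem_keys_iff]
      constructor
      · rintro ⟨v, hv⟩
        rw [hinner] at hv
        rcases List.mem_filterMap.mp hv with ⟨kv, hkv, hpr⟩
        rw [pvProjY] at hpr
        split_ifs at hpr with ht
        · have h1 : kv.1.1 = a := congrArg Prod.fst (Option.some.inj hpr)
          refine ⟨kv.2, ?_⟩
          have hkv' : kv = ((a, y), kv.2) := Prod.ext (Prod.ext h1 ht) rfl
          rw [← hkv']; exact hkv
      · rintro ⟨v, hv⟩
        exact ⟨v, by rw [hinner]; exact List.mem_filterMap.mpr ⟨((a, y), v), hv, by simp [pvProjY]⟩⟩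
    have hcontains : (S.getD y PySem.Dict.empty).contains a = Bd.contains (a, y) := by
      cases hb : Bd.contains (a, y) with
      | true =>
        exact (PySem.Dict.contains_iff_mem_keys _ _).mpr
          (hmemiff.mpr ((PySem.Dict.contains_iff_mem_keys _ _).mp hb))
      | false =>
        cases hib : (S.getD y PySem.Dict.empty).contains a with
        | false => rfl
        | true =>
          have hmem := hmemiff.mp ((PySem.Dict.contains_iff_mem_keys _ _).mp hib)
          exact absurd ((PySem.Dict.contains_iff_mem_keys _ _).mpr hmem) (by simp [hb])
    by_cases hc : Bd.contains (a, y) = true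
    · rw [PySem.Dict.items_insert_of_contains _ _ (hcontains.trans hc),
        PySem.Dict.items_insert_of_contains _ _ hc, hinner, List.map_filterMap, List.filterMap_map]
      refine List.filterMap_congr ?_
      intro kv _
      simp only [Function.comp]
      obtain ⟨⟨u, v⟩, n⟩ := kv
      by_cases hv : v = y
      · subst hv
        by_cases hu : u = a
        · subst hu; simp [pvProjY]
        · simp [pvProjY, hu]
      · simp [pvProjY, hv]
    · have hc' : Bd.contains (a, y) = false := by
        cases h : Bd.contains (a, y)
        · rfl
        · exact absurd h hc
      rw [PySem.Dict.items_insert_of_not_contains _ _ (hcontains.trans hc'),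
        PySem.Dict.items_insert_of_not_contains _ _ hc', List.filterMap_append, hinner]
      simp [pvProjY]
  · rw [PySem.Dict.getD_insert_of_ne _ _ _ hy, hinv y]
    cases hc : Bd.contains (a, b) with
    | true =>
      rw [PySem.Dict.items_insert_of_contains _ _ hc, List.filterMap_map]
      refine (List.filterMap_congr ?_).symm
      intro kv _
      simp only [Function.comp]
      obtain ⟨⟨u, v⟩, n⟩ := kv
      by_cases huv : (u, v) = (a, b)
      · have hvb : v = b := congrArg Prod.snd huv
        have hby : ¬b = y := fun h => hy h.symm
        have hvy : ¬v = y := hvb ▸ hby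
        simp [pvProjY, huv, hvy, hby]
      · simp [pvProjY, huv]
    | false =>
      rw [PySem.Dict.items_insert_of_not_contains _ _ hc, List.filterMap_append]
      simp [pvProjY, (Ne.symm hy : b ≠ y)]

theorem pvInv_foldX (rows : List (String × Int × Int)) :
    ∀ (S : PySem.Dict Int (PySem.Dict Int String)) (Bd : PySem.Dict (Int × Int) String),
    (∀ x, (S.getD x PySem.Dict.empty).items = Bd.items.filterMap (pvProjX x)) →
    ∀ x, ((rows.foldl (fun d r =>
            d.insert r.2.1 ((d.getD r.2.1 PySem.Dict.empty).insert r.2.2 r.1)) S).getD x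
            PySem.Dict.empty).items
      = (rows.foldl (fun d r => d.insert (r.2.1, r.2.2) r.1) Bd).items.filterMap (pvProjX x) := by
  induction rows with
  | nil => intro S Bd hinv x; exact hinv x
  | cons r t ih =>
    intro S Bd hinv x
    exact ih _ _ (pvInv_stepX r.1 r.2.1 r.2.2 S Bd hinv) x

theorem pvInv_foldY (rows : List (String × Int × Int)) :
    ∀ (S : PySem.Dict Int (PySem.Dict Int String)) (Bd : PySem.Dict (Int × Int) String),
    (∀ y, (S.getD y PySem.Dict.empty).items = Bd.items.filterMap (pvProjY y)) →
    ∀ y, ((rows.foldl (fun d r =>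
            d.insert r.2.2 ((d.getD r.2.2 PySem.Dict.empty).insert r.2.1 r.1)) S).getD y
            PySem.Dict.empty).items
      = (rows.foldl (fun d r => d.insert (r.2.1, r.2.2) r.1) Bd).items.filterMap (pvProjY y) := by
  induction rows with
  | nil => intro S Bd hinv y; exact hinv y
  | cons r t ih =>
    intro S Bd hinv y
    exact ih _ _ (pvInv_stepY r.1 r.2.1 r.2.2 S Bd hinv) y


-- ---- the heart: A's two bisect neighbours realise the minimum over all candidates ----

theorem pvSorted_split {l : List Int} {y : Int} (hlt : l.Pairwise (· < ·)) (hy : y ∈ l) :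
    ∃ Lb La, l = Lb ++ y :: La ∧ (∀ z ∈ Lb, z < y) ∧ (∀ z ∈ La, y < z) := by
  induction l with
  | nil => simp at hy
  | cons a t ih =>
    rcases List.mem_cons.mp hy with rfl | hyt
    · exact ⟨[], t, rfl, by simp, fun z hz => (List.pairwise_cons.mp hlt).1 z hz⟩
    · obtain ⟨Lb, La, h1, h2, h3⟩ := ih (List.pairwise_cons.mp hlt).2 hyt
      have ha : a < y := (List.pairwise_cons.mp hlt).1 y hyt
      exact ⟨a :: Lb, La, by rw [h1]; rfl,
        fun z hz => by rcases List.mem_cons.mp hz with rfl | hz; exacts [ha, h2 z hz], h3⟩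

theorem pvNodup_projX (items : List ((Int × Int) × String)) (x : Int)
    (hnd : (items.map (fun kv => kv.1)).Nodup) :
    ((items.filterMap (pvProjX x)).map (fun pr => pr.1)).Nodup := by
  induction items with
  | nil => simp
  | cons kv t ih =>
    rw [List.map_cons] at hnd
    obtain ⟨hh, ht⟩ := List.nodup_cons.mp hnd
    cases hpr : pvProjX x kv with
    | none => rw [List.filterMap_cons_none hpr]; exact ih ht
    | some pr =>
      rw [List.filterMap_cons_some hpr, List.map_cons, List.nodup_cons]
      refine ⟨?_, ih ht⟩
      intro hmem
      rcases List.mem_map.mp hmem with ⟨pr', hpr', hfst⟩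
      rcases List.mem_filterMap.mp hpr' with ⟨kv', hkv', hproj'⟩
      rw [pvProjX] at hpr hproj'
      split_ifs at hpr with h1
      split_ifs at hproj' with h2
      have e1 : kv.1.2 = pr.1 := congrArg Prod.fst (Option.some.inj hpr)
      have e2 : kv'.1.2 = pr'.1 := congrArg Prod.fst (Option.some.inj hproj')
      have hk : kv'.1 = kv.1 := Prod.ext (h2.trans h1.symm) (by rw [e2, e1, hfst])
      exact hh (hk ▸ List.mem_map.mpr ⟨kv', hkv', rfl⟩)

theorem pvNodup_projY (items : List ((Int × Int) × String)) (y : Int)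
    (hnd : (items.map (fun kv => kv.1)).Nodup) :
    ((items.filterMap (pvProjY y)).map (fun pr => pr.1)).Nodup := by
  induction items with
  | nil => simp
  | cons kv t ih =>
    rw [List.map_cons] at hnd
    obtain ⟨hh, ht⟩ := List.nodup_cons.mp hnd
    cases hpr : pvProjY y kv with
    | none => rw [List.filterMap_cons_none hpr]; exact ih ht
    | some pr =>
      rw [List.filterMap_cons_some hpr, List.map_cons, List.nodup_cons]
      refine ⟨?_, ih ht⟩
      intro hmem
      rcases List.mem_map.mp hmem with ⟨pr', hpr', hfst⟩
      rcases List.mem_filterMap.mp hpr' with ⟨kv', hkv', hproj'⟩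
      rw [pvProjY] at hpr hproj'
      split_ifs at hpr with h1
      split_ifs at hproj' with h2
      have e1 : kv.1.1 = pr.1 := congrArg Prod.fst (Option.some.inj hpr)
      have e2 : kv'.1.1 = pr'.1 := congrArg Prod.fst (Option.some.inj hproj')
      have hk : kv'.1 = kv.1 := Prod.ext (by rw [e2, e1, hfst]) (h2.trans h1.symm)
      exact hh (hk ▸ List.mem_map.mpr ⟨kv', hkv', rfl⟩)

theorem pvView_eval (near : Option (Int × String)) (x y : Int)
    (same : PySem.Dict Int (PySem.Dict Int String)) (sort : PySem.Dict Int (List Int))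
    (inner : PySem.Dict Int String)
    (hin : same.getD x PySem.Dict.empty = inner)
    (hsort : sort.getD x [] =
      PySem.List.sorted (inner.items.map (fun p => p.1)) (fun v => v) false)
    (hnd : (inner.items.map (fun p => p.1)).Nodup)
    (hy : y ∈ inner.items.map (fun p => p.1)) :
    pvView near x y same sort
      = pvOMin near (pvMinList (inner.items.filterMap
          (fun pr => if pr.1 ≠ y then some (|pr.1 - y|, pr.2) else none))) := by
  have hknodup : inner.keys.Nodup := by simp only [PySem.Dict.keys]; exact hnd
  have hval : ∀ pr ∈ inner.items, inner.getD pr.1 "" = pr.2 := by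
    intro pr hpr
    exact PySem.Dict.getD_of_mem_items inner hpr hknodup ""
  have hpair : ∀ k ∈ inner.items.map (fun p => p.1), (k, inner.getD k "") ∈ inner.items := by
    intro k hk
    rcases List.mem_map.mp hk with ⟨pr, hpr, rfl⟩
    rw [hval pr hpr]
    exact hpr
  simp only [pvView]
  rw [hsort, hin]
  set keys := inner.items.map (fun p => p.1) with hkeys
  set l := PySem.List.sorted keys (fun v => v) false with hldef
  set cs := inner.items.filterMap
      (fun pr => if pr.1 ≠ y then some (|pr.1 - y|, pr.2) else none) with hcs
  have hcs_mem : ∀ z ∈ cs, ∃ pr ∈ inner.items, pr.1 ≠ y ∧ z = (|pr.1 - y|, pr.2) := by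
    intro z hz
    rcases List.mem_filterMap.mp hz with ⟨pr, hpr, hfz⟩
    split_ifs at hfz with hne
    · exact ⟨pr, hpr, hne, (Option.some.inj hfz).symm⟩
  have hmem_cs : ∀ pr ∈ inner.items, pr.1 ≠ y → (|pr.1 - y|, pr.2) ∈ cs := by
    intro pr hpr hne
    exact List.mem_filterMap.mpr ⟨pr, hpr, by rw [if_pos hne]⟩
  have hperm : l.Perm keys := PySem.List.sorted_perm keys _ false
  have hle : l.Pairwise (· ≤ ·) := PySem.List.sorted_pairwise keys (fun v => v)
  have hndl : l.Nodup := (hperm.nodup_iff).mpr hnd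
  have hlt : l.Pairwise (· < ·) :=
    (hle.and hndl).imp (fun h => lt_of_le_of_ne h.1 h.2)
  have hyl : y ∈ l := hperm.mem_iff.mpr hy
  obtain ⟨Lb, La, hsplit, hLb, hLa⟩ := pvSorted_split hlt hyl
  have hLbpw : Lb.Pairwise (· < ·) := (hsplit ▸ hlt).sublist (List.sublist_append_left _ _)
  have hLapw : La.Pairwise (· < ·) :=
    (List.pairwise_cons.mp ((hsplit ▸ hlt).sublist (List.sublist_append_right _ _))).2
  have hlen : l.length = Lb.length + (La.length + 1) := by rw [hsplit]; simp
  have hkey_cases : ∀ k, k ∈ keys → k ∈ Lb ∨ k = y ∨ k ∈ La := by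
    intro k hk
    have : k ∈ Lb ++ y :: La := hsplit ▸ hperm.mem_iff.mpr hk
    rcases List.mem_append.mp this with h | h
    · exact Or.inl h
    · rcases List.mem_cons.mp h with h | h
      · exact Or.inr (Or.inl h)
      · exact Or.inr (Or.inr h)
  have hmem_keys : ∀ {z}, z ∈ l → z ∈ keys := fun hz => hperm.mem_iff.mp hz
  -- the bisect index is the number of elements below y
  set i := PySem.List.bisectLeft l y with hii
  have hi : i = Lb.length := by
    obtain ⟨hi1, hi2, hi3⟩ := PySem.List.bisectLeft_spec l y hle
    rw [← hii] at hi1 hi2 hi3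
    by_contra hne
    rcases Nat.lt_or_ge i Lb.length with hcase | hcase
    · have hj : i < l.length := by omega
      have h1 : l[i]? = some l[i] := List.getElem?_eq_getElem hj
      have h2 : l[i]? = Lb[i]? := by rw [hsplit]; exact List.getElem?_append_left hcase
      have hmem : l[i] ∈ Lb := List.mem_of_getElem? (h2.symm.trans h1)
      have hv1 := hLb _ hmem
      have hv2 := hi3 i hj (le_refl _)
      omega
    · have hcase' : Lb.length < i := by omega
      have hj : Lb.length < l.length := by omega
      have h1 : l[Lb.length]? = some y := by
        rw [hsplit, List.getElem?_append_right (le_refl _)]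
        simp
      have h2 : l[Lb.length] = y := by
        have h3 := List.getElem?_eq_getElem hj
        rw [h1] at h3; exact (Option.some.inj h3).symm
      have hv := hi2 Lb.length hj hcase'
      omega
  rw [hi, pvOMin_assoc]
  congr 1
  -- the two neighbour candidates against the brute-force minimum
  rcases Lb.eq_nil_or_concat with rfl | ⟨Lb', bm, rfl⟩
  · -- nothing below y
    rw [if_neg (by simp)]
    cases La with
    | nil =>
      -- y is alone on this line
      rw [if_neg (by simp [hlen])]
      have : cs = [] := by
        rw [hcs]
        rw [List.filterMap_eq_nil_iff]
        intro pr hpr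
        rcases hkey_cases pr.1 (List.mem_map.mpr ⟨pr, hpr, rfl⟩) with h | h | h
        · simp at h
        · rw [if_neg (by simpa using h)]
        · simp at h
      rw [this]
      rfl
    | cons amin La' =>
      -- only neighbours above
      have hgu : ((([] : List Int).length : Int)) < (l.length : Int) - 1 := by
        rw [hlen]; simp
      rw [if_pos hgu]
      have hgd : l.getD (([] : List Int).length + 1) 0 = amin := by
        rw [List.getD_eq_getElem?_getD, hsplit]
        simp
      rw [hgd]
      have hay : y < amin := hLa _ List.mem_cons_self
      have hak : amin ∈ keys := hmem_keys (hsplit ▸ (by simp : amin ∈ [] ++ y :: amin :: La'))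
      have hprm := hpair amin hak
      have habs : |amin - y| = amin - y := abs_of_nonneg (by omega)
      rw [pvOMin_none_left]
      refine (pvMinList_eq_of_min ?_ ?_).symm
      · have := hmem_cs _ hprm (by omega)
        simpa [habs] using this
      · intro z hz
        rcases hcs_mem z hz with ⟨pr, hpr, hne, rfl⟩
        rcases hkey_cases pr.1 (List.mem_map.mpr ⟨pr, hpr, rfl⟩) with h | h | h
        · simp at h
        · exact absurd h hne
        · rcases List.mem_cons.mp h with rfl | h
          · exact Or.inr ⟨habs.symm, le_of_eq (hval pr hpr)⟩
          · have h1 : amin < pr.1 := (List.pairwise_cons.mp hLapw).1 _ h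
            have h2 : |pr.1 - y| = pr.1 - y := abs_of_nonneg (by omega)
            refine Or.inl ?_
            dsimp only
            rw [h2]; omega
  · -- something below y
    simp only [List.concat_eq_append] at hsplit hLb hLbpw hlen hkey_cases hi ⊢
    have hmlen : (Lb' ++ [bm]).length = Lb'.length + 1 := by simp
    rw [if_pos (by simp)]
    have hbmem : bm ∈ Lb' ++ [bm] := by simp
    have hby : bm < y := hLb _ hbmem
    have hbk : bm ∈ keys := hmem_keys (hsplit ▸ List.mem_append_left _ hbmem)
    have hbpr := hpair bm hbk
    have hbabs : |bm - y| = y - bm := by rw [abs_sub_comm]; exact abs_of_nonneg (by omega)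
    have hbmax : ∀ z ∈ Lb' ++ [bm], z ≤ bm := by
      intro z hz
      rcases List.mem_append.mp hz with h | h
      · have := (List.pairwise_append.mp hLbpw).2.2 z h bm (by simp)
        omega
      · simp at h; omega
    have hgd1 : l.getD ((Lb' ++ [bm]).length - 1) 0 = bm := by
      rw [List.getD_eq_getElem?_getD, hsplit, hmlen]
      rw [List.getElem?_append_left (by simp)]
      simp
    rw [hgd1]
    cases La with
    | nil =>
      -- only neighbours below
      rw [if_neg (by rw [hlen, hmlen]; simp)]
      rw [pvOMin_none_right]
      refine (pvMinList_eq_of_min ?_ ?_).symm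
      · have := hmem_cs _ hbpr (by omega)
        simpa [hbabs] using this
      · intro z hz
        rcases hcs_mem z hz with ⟨pr, hpr, hne, rfl⟩
        rcases hkey_cases pr.1 (List.mem_map.mpr ⟨pr, hpr, rfl⟩) with h | h | h
        · by_cases hprb : pr.1 = bm
          · subst hprb
            exact Or.inr ⟨hbabs.symm, le_of_eq (hval pr hpr)⟩
          · have h1 : pr.1 ≤ bm := hbmax _ h
            have h2 : pr.1 < y := hLb _ h
            have h3 : |pr.1 - y| = y - pr.1 := by
              rw [abs_sub_comm]; exact abs_of_nonneg (by omega)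
            refine Or.inl ?_
            dsimp only
            rw [h3]; omega
        · exact absurd h hne
        · simp at h
    | cons amin La' =>
      -- neighbours on both sides: Python min of the two
      have hgu : ((Lb' ++ [bm]).length : Int) < (l.length : Int) - 1 := by
        rw [hlen, hmlen]; simp; omega
      rw [if_pos hgu]
      have hgd2 : l.getD ((Lb' ++ [bm]).length + 1) 0 = amin := by
        rw [List.getD_eq_getElem?_getD, hsplit, hmlen]
        rw [List.getElem?_append_right (by simp)]
        simp
      rw [hgd2]
      have hamem : amin ∈ amin :: La' := List.mem_cons_self
      have hay : y < amin := hLa _ hamem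
      have hak : amin ∈ keys := hmem_keys (hsplit ▸ List.mem_append_right _ (by simp))
      have hapr := hpair amin hak
      have haabs : |amin - y| = amin - y := abs_of_nonneg (by omega)
      have hbcs : (y - bm, inner.getD bm "") ∈ cs := by
        have := hmem_cs _ hbpr (by omega)
        simpa [hbabs] using this
      have hacs : (amin - y, inner.getD amin "") ∈ cs := by
        have := hmem_cs _ hapr (by omega)
        simpa [haabs] using this
      show some (pvNMin _ _) = _
      refine (pvMinList_eq_of_min ?_ ?_).symm
      · rcases pvNMin_cases (y - bm, inner.getD bm "") (amin - y, inner.getD amin "") with h | h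
        · rw [h]; exact hbcs
        · rw [h]; exact hacs
      · intro z hz
        have hlb : pvLexLe (pvNMin (y - bm, inner.getD bm "") (amin - y, inner.getD amin ""))
            (y - bm, inner.getD bm "") := pvNMin_lexLe_left _ _
        have hla : pvLexLe (pvNMin (y - bm, inner.getD bm "") (amin - y, inner.getD amin ""))
            (amin - y, inner.getD amin "") := pvNMin_lexLe_right _ _
        rcases hcs_mem z hz with ⟨pr, hpr, hne, rfl⟩
        rcases hkey_cases pr.1 (List.mem_map.mpr ⟨pr, hpr, rfl⟩) with h | h | h
        · by_cases hprb : pr.1 = bm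
          · subst hprb
            rw [hbabs, ← hval pr hpr]
            exact hlb
          · have h1 : pr.1 ≤ bm := hbmax _ h
            have h2 : pr.1 < y := hLb _ h
            have h3 : |pr.1 - y| = y - pr.1 := by
              rw [abs_sub_comm]; exact abs_of_nonneg (by omega)
            have hfst : (pvNMin (y - bm, inner.getD bm "") (amin - y, inner.getD amin "")).1 ≤ y - bm := by
              rcases hlb with h | h
              · exact le_of_lt h
              · exact le_of_eq h.1
            refine Or.inl ?_
            dsimp only at hfst ⊢
            rw [h3]; omega
        · exact absurd h hne
        · rcases List.mem_cons.mp h with rfl | h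
          · rw [haabs, ← hval pr hpr]
            exact hla
          · have h1 : amin < pr.1 := (List.pairwise_cons.mp hLapw).1 _ h
            have h2 : |pr.1 - y| = pr.1 - y := abs_of_nonneg (by omega)
            have hfst : (pvNMin (y - bm, inner.getD bm "") (amin - y, inner.getD amin "")).1 ≤ amin - y := by
              rcases hla with h | h
              · exact le_of_lt h
              · exact le_of_eq h.1
            refine Or.inl ?_
            dsimp only at hfst ⊢
            rw [h2]; omega


-- ---- assembling the two programs ----

theorem pvRows_fst (points : List String) (xC yC : List Int) :
    (points.zip (xC.zip yC)).map Prod.fst = points.take (min xC.length yC.length) := by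
  have h : ∀ (l : List String) (l' : List (Int × Int)),
      (l.zip l').map Prod.fst = l.take l'.length := by
    intro l l'
    induction l generalizing l' with
    | nil => simp
    | cons a t ih =>
      cases l' with
      | nil => simp
      | cons b t' => simp [ih]
  rw [h, List.length_zip]

theorem pvCoord_get (rows : List (String × Int × Int)) (q : String) :
    ∀ (C : PySem.Dict String (Int × Int)),
    (q ∈ rows.map Prod.fst ∨ ∃ c, C.get? q = some c) →
    ∃ c, (rows.foldl (fun d r => d.insert r.1 (r.2.1, r.2.2)) C).get? q = some c := by
  induction rows with
  | nil =>
    intro C h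
    rcases h with h | h
    · simp at h
    · exact h
  | cons r t ih =>
    intro C h
    apply ih
    by_cases hq : q = r.1
    · exact Or.inr ⟨(r.2.1, r.2.2), by rw [PySem.Dict.get?_insert, if_pos hq]⟩
    · rcases h with h | h
      · rw [List.map_cons] at h
        rcases List.mem_cons.mp h with h | h
        · exact absurd h hq
        · exact Or.inl h
      · rcases h with ⟨c, hc⟩
        exact Or.inr ⟨c, by rw [PySem.Dict.get?_insert, if_neg hq]; exact hc⟩

theorem pvXY_coord (rows : List (String × Int × Int)) :
    ∀ (XY : PySem.Dict String ((Int × Int) × (Int × Int))) (C : PySem.Dict String (Int × Int)),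
    (∀ p, XY.get? p = (C.get? p).map (fun c => ((c.1, c.2), (c.2, c.1)))) →
    ∀ p, (rows.foldl (fun d r => d.insert r.1 ((r.2.1, r.2.2), (r.2.2, r.2.1))) XY).get? p
      = ((rows.foldl (fun d r => d.insert r.1 (r.2.1, r.2.2)) C).get? p).map
          (fun c => ((c.1, c.2), (c.2, c.1))) := by
  induction rows with
  | nil => intro XY C h p; exact h p
  | cons r t ih =>
    intro XY C h p
    apply ih
    intro p'
    rw [PySem.Dict.get?_insert, PySem.Dict.get?_insert]
    by_cases hp : p' = r.1
    · rw [if_pos hp, if_pos hp]; rfl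
    · rw [if_neg hp, if_neg hp]; exact h p'

theorem pvCoordKey (rows : List (String × Int × Int)) :
    ∀ (C : PySem.Dict String (Int × Int)) (Bd : PySem.Dict (Int × Int) String),
    (∀ p c, C.get? p = some c → (c.1, c.2) ∈ Bd.keys) →
    ∀ p c, (rows.foldl (fun d r => d.insert r.1 (r.2.1, r.2.2)) C).get? p = some c →
      (c.1, c.2) ∈ (rows.foldl (fun d r => d.insert (r.2.1, r.2.2) r.1) Bd).keys := by
  induction rows with
  | nil => intro C Bd h p c hc; exact h p c hc
  | cons r t ih =>
    intro C Bd h p c hc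
    refine ih _ _ ?_ p c hc
    intro p' c' hc'
    rw [PySem.Dict.get?_insert] at hc'
    by_cases hp : p' = r.1
    · rw [if_pos hp] at hc'
      have : c' = (r.2.1, r.2.2) := Option.some.inj hc'.symm
      rw [PySem.Dict.mem_keys_insert]
      exact Or.inl (by rw [this])
    · rw [if_neg hp] at hc'
      rw [PySem.Dict.mem_keys_insert]
      exact Or.inr (h p' c' hc')

theorem pvValues_sub (rows : List (String × Int × Int)) :
    ∀ (Bd : PySem.Dict (Int × Int) String),
    ∀ w ∈ (rows.foldl (fun d r => d.insert (r.2.1, r.2.2) r.1) Bd).values,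
    w ∈ rows.map Prod.fst ∨ w ∈ Bd.values := by
  induction rows with
  | nil => intro Bd w hw; exact Or.inr hw
  | cons r t ih =>
    intro Bd w hw
    rcases ih _ w hw with h | h
    · rw [List.map_cons]; exact Or.inl (List.mem_cons_of_mem _ h)
    · rcases PySem.Dict.mem_values_insert _ _ _ _ h with h | h
      · rw [List.map_cons]; exact Or.inl (h ▸ List.mem_cons_self)
      · exact Or.inr h

theorem pvSortD (S : PySem.Dict Int (PySem.Dict Int String)) (hnd : S.keys.Nodup)
    {k : Int} {inner : PySem.Dict Int String} (hk : S.get? k = some inner) :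
    (S.items.foldl (fun d kv =>
        d.insert kv.1 (PySem.List.sorted (kv.2.items.map (fun p => p.1)) (fun v => v) false))
      PySem.Dict.empty).getD k []
      = PySem.List.sorted (inner.items.map (fun p => p.1)) (fun v => v) false := by
  have hfresh := PySem.Dict.items_foldl_insert_fresh S.items (fun kv => kv.1)
    (fun kv => PySem.List.sorted (kv.2.items.map (fun p => p.1)) (fun v => v) false)
    PySem.Dict.empty (fun a _ => PySem.Dict.contains_empty _) hnd
  have hemp : (PySem.Dict.empty : PySem.Dict Int (List Int)).items = [] := rfl
  refine PySem.Dict.getD_of_mem_items _ ?_ ?_ []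
  · rw [hfresh, hemp, List.nil_append]
    exact List.mem_map.mpr ⟨(k, inner), PySem.Dict.mem_items_of_get?_eq_some _ hk, rfl⟩
  · simp only [PySem.Dict.keys, hfresh, hemp, List.nil_append, List.map_map]
    exact hnd

theorem pvOMin_mem {a b : Option (Int × String)} {m : Int × String}
    (h : pvOMin a b = some m) : a = some m ∨ b = some m := by
  cases a with
  | none => exact Or.inr h
  | some a' =>
    cases b with
    | none => exact Or.inl h
    | some b' =>
      simp only [pvOMin] at h
      rcases pvNMin_cases a' b' with he | he <;> rw [he] at h
      · exact Or.inl h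
      · exact Or.inr h

theorem pvCand_split (qc : Int × Int) (kv : (Int × Int) × String) :
    (pvCandF qc kv = (pvProjX qc.1 kv).bind
        (fun pr => if pr.1 ≠ qc.2 then some (|pr.1 - qc.2|, pr.2) else none) ∧
      (pvProjY qc.2 kv).bind
        (fun pr => if pr.1 ≠ qc.1 then some (|pr.1 - qc.1|, pr.2) else none) = none) ∨
    (pvCandF qc kv = (pvProjY qc.2 kv).bind
        (fun pr => if pr.1 ≠ qc.1 then some (|pr.1 - qc.1|, pr.2) else none) ∧
      (pvProjX qc.1 kv).bind
        (fun pr => if pr.1 ≠ qc.2 then some (|pr.1 - qc.2|, pr.2) else none) = none) := by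
  obtain ⟨⟨u, v⟩, n⟩ := kv
  by_cases hu : u = qc.1 <;> by_cases hv : v = qc.2
  · left
    constructor
    · simp [pvCandF, pvProjX, hu, hv]
    · simp [pvProjY, hu, hv]
  · left
    constructor
    · simp [pvCandF, pvProjX, hu, hv]
      exact fun h => hv (congrArg Prod.snd h)
    · simp [pvProjY, hv]
  · right
    constructor
    · simp [pvCandF, pvProjY, hu, hv]
      exact fun h => hu (congrArg Prod.fst h)
    · simp [pvProjX, hu]
  · right
    constructor
    · simp [pvCandF, pvProjY, hu, hv]
    · simp [pvProjX, hu]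

-- ===== VERDICT (by name: the statement is the Claim_ definition above) =====
theorem nearestCity_spec : Claim_equal_nearestCity := by
  intro points xC yC queried hdom hpre
  obtain ⟨hpre1, hpre2⟩ := hpre
  show nearestCity points xC yC queried = nearestCity_alt points xC yC queried
  simp only [nearestCity, nearestCity_alt]
  set rows := points.zip (xC.zip yC) with hrows
  have hB : rows.foldl
      (fun (s : PySem.Dict String (Int × Int) × PySem.Dict (Int × Int) String) r =>
        (s.1.insert r.1 (r.2.1, r.2.2), s.2.insert (r.2.1, r.2.2) r.1))
      (PySem.Dict.empty, PySem.Dict.empty)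
      = (rows.foldl (fun d r => d.insert r.1 (r.2.1, r.2.2)) PySem.Dict.empty,
         rows.foldl (fun d r => d.insert (r.2.1, r.2.2) r.1) PySem.Dict.empty) :=
    PySem.List.foldl_prod_mk
      (fun (d : PySem.Dict String (Int × Int)) (r : String × Int × Int) => d.insert r.1 (r.2.1, r.2.2))
      (fun (d : PySem.Dict (Int × Int) String) r => d.insert (r.2.1, r.2.2) r.1)
      rows PySem.Dict.empty PySem.Dict.empty
  have hA2 : rows.foldl
      (fun (s : PySem.Dict Int (PySem.Dict Int String) × PySem.Dict Int (PySem.Dict Int String)) r =>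
        (s.1.insert r.2.1 ((s.1.getD r.2.1 PySem.Dict.empty).insert r.2.2 r.1),
         s.2.insert r.2.2 ((s.2.getD r.2.2 PySem.Dict.empty).insert r.2.1 r.1)))
      (PySem.Dict.empty, PySem.Dict.empty)
      = (rows.foldl (fun d r => d.insert r.2.1 ((d.getD r.2.1 PySem.Dict.empty).insert r.2.2 r.1)) PySem.Dict.empty,
         rows.foldl (fun d r => d.insert r.2.2 ((d.getD r.2.2 PySem.Dict.empty).insert r.2.1 r.1)) PySem.Dict.empty) :=
    PySem.List.foldl_prod_mk
      (fun (d : PySem.Dict Int (PySem.Dict Int String)) (r : String × Int × Int) =>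
        d.insert r.2.1 ((d.getD r.2.1 PySem.Dict.empty).insert r.2.2 r.1))
      (fun (d : PySem.Dict Int (PySem.Dict Int String)) r =>
        d.insert r.2.2 ((d.getD r.2.2 PySem.Dict.empty).insert r.2.1 r.1))
      rows PySem.Dict.empty PySem.Dict.empty
  have hA : rows.foldl
      (fun (st : PySem.Dict String ((Int × Int) × (Int × Int)) ×
            (PySem.Dict Int (PySem.Dict Int String) × PySem.Dict Int (PySem.Dict Int String))) r =>
        (st.1.insert r.1 ((r.2.1, r.2.2), (r.2.2, r.2.1)),
         (st.2.1.insert r.2.1 ((st.2.1.getD r.2.1 PySem.Dict.empty).insert r.2.2 r.1),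
          st.2.2.insert r.2.2 ((st.2.2.getD r.2.2 PySem.Dict.empty).insert r.2.1 r.1))))
      (PySem.Dict.empty, (PySem.Dict.empty, PySem.Dict.empty))
      = (rows.foldl (fun d r => d.insert r.1 ((r.2.1, r.2.2), (r.2.2, r.2.1))) PySem.Dict.empty,
         (rows.foldl (fun d r => d.insert r.2.1 ((d.getD r.2.1 PySem.Dict.empty).insert r.2.2 r.1)) PySem.Dict.empty,
          rows.foldl (fun d r => d.insert r.2.2 ((d.getD r.2.2 PySem.Dict.empty).insert r.2.1 r.1)) PySem.Dict.empty)) :=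
    (PySem.List.foldl_prod_mk
      (fun (d : PySem.Dict String ((Int × Int) × (Int × Int))) (r : String × Int × Int) =>
        d.insert r.1 ((r.2.1, r.2.2), (r.2.2, r.2.1)))
      (fun (s : PySem.Dict Int (PySem.Dict Int String) × PySem.Dict Int (PySem.Dict Int String)) r =>
        (s.1.insert r.2.1 ((s.1.getD r.2.1 PySem.Dict.empty).insert r.2.2 r.1),
         s.2.insert r.2.2 ((s.2.getD r.2.2 PySem.Dict.empty).insert r.2.1 r.1)))
      rows PySem.Dict.empty (PySem.Dict.empty, PySem.Dict.empty)).trans (by rw [hA2])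
  rw [hA, hB]
  dsimp only
  set Bd := rows.foldl (fun d r => d.insert (r.2.1, r.2.2) r.1)
    (PySem.Dict.empty : PySem.Dict (Int × Int) String) with hBd
  set C := rows.foldl (fun d r => d.insert r.1 (r.2.1, r.2.2))
    (PySem.Dict.empty : PySem.Dict String (Int × Int)) with hC
  set XY := rows.foldl (fun d r => d.insert r.1 ((r.2.1, r.2.2), (r.2.2, r.2.1)))
    (PySem.Dict.empty : PySem.Dict String ((Int × Int) × (Int × Int))) with hXY
  set S0 := rows.foldl (fun d r => d.insert r.2.1 ((d.getD r.2.1 PySem.Dict.empty).insert r.2.2 r.1))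
    (PySem.Dict.empty : PySem.Dict Int (PySem.Dict Int String)) with hS0
  set S1 := rows.foldl (fun d r => d.insert r.2.2 ((d.getD r.2.2 PySem.Dict.empty).insert r.2.1 r.1))
    (PySem.Dict.empty : PySem.Dict Int (PySem.Dict Int String)) with hS1
  set T0 := S0.items.foldl (fun d kv =>
      d.insert kv.1 (PySem.List.sorted (kv.2.items.map (fun p => p.1)) (fun v => v) false))
    (PySem.Dict.empty : PySem.Dict Int (List Int)) with hT0
  set T1 := S1.items.foldl (fun d kv =>
      d.insert kv.1 (PySem.List.sorted (kv.2.items.map (fun p => p.1)) (fun v => v) false))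
    (PySem.Dict.empty : PySem.Dict Int (List Int)) with hT1
  have hndB : Bd.keys.Nodup :=
    PySem.Dict.nodup_keys_foldl_insert_key rows (fun r => (r.2.1, r.2.2)) (fun _ r => r.1) _
      PySem.Dict.nodup_keys_empty
  have hndS0 : S0.keys.Nodup :=
    PySem.Dict.nodup_keys_foldl_insert_key rows (fun r => r.2.1)
      (fun d r => (d.getD r.2.1 PySem.Dict.empty).insert r.2.2 r.1) _ PySem.Dict.nodup_keys_empty
  have hndS1 : S1.keys.Nodup :=
    PySem.Dict.nodup_keys_foldl_insert_key rows (fun r => r.2.2)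
      (fun d r => (d.getD r.2.2 PySem.Dict.empty).insert r.2.1 r.1) _ PySem.Dict.nodup_keys_empty
  have hinv0 : ∀ x, (S0.getD x PySem.Dict.empty).items = Bd.items.filterMap (pvProjX x) :=
    pvInv_foldX rows PySem.Dict.empty PySem.Dict.empty
      (fun x => by rw [PySem.Dict.getD_empty]; rfl)
  have hinv1 : ∀ y, (S1.getD y PySem.Dict.empty).items = Bd.items.filterMap (pvProjY y) :=
    pvInv_foldY rows PySem.Dict.empty PySem.Dict.empty
      (fun y => by rw [PySem.Dict.getD_empty]; rfl)
  rw [PySem.List.foldl_append_singleton_eq_map, List.nil_append]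
  refine List.map_congr_left ?_
  intro q hq
  have hqrows : q ∈ rows.map Prod.fst := by
    rw [hrows, pvRows_fst]; exact hpre1 q hq
  obtain ⟨qc, hqc⟩ := pvCoord_get rows q PySem.Dict.empty (Or.inl hqrows)
  have hXYq : XY.getD q ((0, 0), (0, 0)) = ((qc.1, qc.2), (qc.2, qc.1)) := by
    have h := pvXY_coord rows PySem.Dict.empty PySem.Dict.empty
      (fun p => by simp [PySem.Dict.get?_empty]) q
    rw [hqc, Option.map_some] at h
    exact PySem.Dict.getD_of_get?_eq_some _ _ h
  have hCq : C.getD q (0, 0) = qc := PySem.Dict.getD_of_get?_eq_some _ _ hqc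
  have hkeyBd : (qc.1, qc.2) ∈ Bd.keys :=
    pvCoordKey rows PySem.Dict.empty PySem.Dict.empty
      (fun p c h => by rw [PySem.Dict.get?_empty] at h; cases h) q qc hqc
  obtain ⟨nq, hnq⟩ := (pvMem_keys_iff _ _).mp hkeyBd
  have hcolq : (qc.2, nq) ∈ Bd.items.filterMap (pvProjX qc.1) :=
    List.mem_filterMap.mpr ⟨((qc.1, qc.2), nq), hnq, by simp [pvProjX]⟩
  have hrowq : (qc.1, nq) ∈ Bd.items.filterMap (pvProjY qc.2) :=
    List.mem_filterMap.mpr ⟨((qc.1, qc.2), nq), hnq, by simp [pvProjY]⟩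
  obtain ⟨inner0, h0⟩ : ∃ inner0, S0.get? qc.1 = some inner0 := by
    cases h0 : S0.get? qc.1 with
    | some inner0 => exact ⟨inner0, rfl⟩
    | none =>
      exfalso
      have h1 := hinv0 qc.1
      rw [PySem.Dict.getD_of_get?_eq_none _ _ h0] at h1
      rw [← h1] at hcolq
      have h2 : (qc.2, nq) ∈ ([] : List (Int × String)) := hcolq
      simp at h2
  obtain ⟨inner1, h1⟩ : ∃ inner1, S1.get? qc.2 = some inner1 := by
    cases h1 : S1.get? qc.2 with
    | some inner1 => exact ⟨inner1, rfl⟩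
    | none =>
      exfalso
      have h2 := hinv1 qc.2
      rw [PySem.Dict.getD_of_get?_eq_none _ _ h1] at h2
      rw [← h2] at hrowq
      have h3 : (qc.1, nq) ∈ ([] : List (Int × String)) := hrowq
      simp at h3
  have hin0 : S0.getD qc.1 PySem.Dict.empty = inner0 := PySem.Dict.getD_of_get?_eq_some _ _ h0
  have hin1 : S1.getD qc.2 PySem.Dict.empty = inner1 := PySem.Dict.getD_of_get?_eq_some _ _ h1
  have hitems0 : inner0.items = Bd.items.filterMap (pvProjX qc.1) := by
    rw [← hin0]; exact hinv0 qc.1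
  have hitems1 : inner1.items = Bd.items.filterMap (pvProjY qc.2) := by
    rw [← hin1]; exact hinv1 qc.2
  have hndit : (Bd.items.map (fun kv => kv.1)).Nodup := by
    simpa only [PySem.Dict.keys] using hndB
  have hsort0 : T0.getD qc.1 [] =
      PySem.List.sorted (inner0.items.map (fun p => p.1)) (fun v => v) false :=
    pvSortD S0 hndS0 h0
  have hsort1 : T1.getD qc.2 [] =
      PySem.List.sorted (inner1.items.map (fun p => p.1)) (fun v => v) false :=
    pvSortD S1 hndS1 h1
  have hnd0 : (inner0.items.map (fun p => p.1)).Nodup := by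
    rw [hitems0]; exact pvNodup_projX _ _ hndit
  have hnd1 : (inner1.items.map (fun p => p.1)).Nodup := by
    rw [hitems1]; exact pvNodup_projY _ _ hndit
  have hy0 : qc.2 ∈ inner0.items.map (fun p => p.1) := by
    rw [hitems0]; exact List.mem_map.mpr ⟨(qc.2, nq), hcolq, rfl⟩
  have hy1 : qc.1 ∈ inner1.items.map (fun p => p.1) := by
    rw [hitems1]; exact List.mem_map.mpr ⟨(qc.1, nq), hrowq, rfl⟩
  rw [hXYq, hCq]
  dsimp only
  rw [pvView_eval none qc.1 qc.2 S0 T0 inner0 hin0 hsort0 hnd0 hy0, pvOMin_none_left,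
    pvView_eval _ qc.2 qc.1 S1 T1 inner1 hin1 hsort1 hnd1 hy1]
  rw [pvBfold_eq qc Bd.items none, pvOMin_none_left]
  rw [pvMinList_split (pvCandF qc)
      (fun kv => (pvProjX qc.1 kv).bind
        (fun pr => if pr.1 ≠ qc.2 then some (|pr.1 - qc.2|, pr.2) else none))
      (fun kv => (pvProjY qc.2 kv).bind
        (fun pr => if pr.1 ≠ qc.1 then some (|pr.1 - qc.1|, pr.2) else none))
      Bd.items (fun kv _ => pvCand_split qc kv)]
  rw [← List.filterMap_filterMap, ← List.filterMap_filterMap, ← hitems0, ← hitems1]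
  cases hn2 : pvOMin
      (pvMinList (inner0.items.filterMap
        (fun pr => if pr.1 ≠ qc.2 then some (|pr.1 - qc.2|, pr.2) else none)))
      (pvMinList (inner1.items.filterMap
        (fun pr => if pr.1 ≠ qc.1 then some (|pr.1 - qc.1|, pr.2) else none))) with
  | none => rfl
  | some dn =>
    have hv : ∃ kv ∈ Bd.items, dn.2 = kv.2 := by
      rcases pvOMin_mem hn2 with h | h
      · have hmem := pvMinList_mem h
        rcases List.mem_filterMap.mp hmem with ⟨pr, hpr, hF⟩
        have hdn : dn.2 = pr.2 := by
          split_ifs at hF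
          exact (congrArg Prod.snd (Option.some.inj hF)).symm
        rw [hitems0] at hpr
        rcases List.mem_filterMap.mp hpr with ⟨kv, hkv, hproj⟩
        have hpk : pr.2 = kv.2 := by
          rw [pvProjX] at hproj
          split_ifs at hproj
          exact (congrArg Prod.snd (Option.some.inj hproj)).symm
        exact ⟨kv, hkv, by rw [hdn, hpk]⟩
      · have hmem := pvMinList_mem h
        rcases List.mem_filterMap.mp hmem with ⟨pr, hpr, hF⟩
        have hdn : dn.2 = pr.2 := by
          split_ifs at hF
          exact (congrArg Prod.snd (Option.some.inj hF)).symm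
        rw [hitems1] at hpr
        rcases List.mem_filterMap.mp hpr with ⟨kv, hkv, hproj⟩
        have hpk : pr.2 = kv.2 := by
          rw [pvProjY] at hproj
          split_ifs at hproj
          exact (congrArg Prod.snd (Option.some.inj hproj)).symm
        exact ⟨kv, hkv, by rw [hdn, hpk]⟩
    rcases hv with ⟨kv, hkv, hdnkv⟩
    have hvv : kv.2 ∈ Bd.values := by
      simp only [PySem.Dict.values]
      exact List.mem_map.mpr ⟨kv, hkv, rfl⟩
    have hname : ¬ dn.2 = "" := by
      rcases pvValues_sub rows PySem.Dict.empty kv.2 hvv with h | h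
      · rw [hrows, pvRows_fst] at h
        intro hcon
        exact hpre2 (List.take_subset _ _ (by rw [← hdnkv, hcon] at h; exact h))
      · have h' : kv.2 ∈ ([] : List String) := h
        simp at h'
    dsimp only
    rw [if_neg hname]
    rfl
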